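-- pv_equiv track=rewrite | github.com/mitkoman/avatar_bot | agent.py | _is_overnight
-- ===== SOURCE A (Python) =====
-- def _is_overnight(segments: list) -> bool:
--     """True if any segment or layover spans midnight."""
--     for seg in segments:
--         if seg["departure"]["at"][:10] != seg["arrival"]["at"][:10]:
--             return True
--     for i in range(len(segments) - 1):
--         if segments[i]["arrival"]["at"][:10] != segments[i + 1]["departure"]["at"][:10]:
--             return True
--     return False
-- ===== SOURCE B (Python) =====
-- def _is_overnight(segments: list) -> bool:
--     """True if any segment or layover spans midnight."""
--     dates = (seg[key]["at"][:10] for seg in segments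
--              for key in ("departure", "arrival"))
--     prev = next(dates, None)
--     for cur in dates:
--         if cur != prev:
--             return True
--         prev = cur
--     return False
-- ===== Notes on version B (the rewrite author's own statement) =====
-- stated objective: simpler
-- what changed: Replaces A's two loops (within-segment check plus an index-based loop comparing arrival to the next departure) by one flattened list of date prefixes in travel order and a single adjacent-pair scan.
import Mathlib
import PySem

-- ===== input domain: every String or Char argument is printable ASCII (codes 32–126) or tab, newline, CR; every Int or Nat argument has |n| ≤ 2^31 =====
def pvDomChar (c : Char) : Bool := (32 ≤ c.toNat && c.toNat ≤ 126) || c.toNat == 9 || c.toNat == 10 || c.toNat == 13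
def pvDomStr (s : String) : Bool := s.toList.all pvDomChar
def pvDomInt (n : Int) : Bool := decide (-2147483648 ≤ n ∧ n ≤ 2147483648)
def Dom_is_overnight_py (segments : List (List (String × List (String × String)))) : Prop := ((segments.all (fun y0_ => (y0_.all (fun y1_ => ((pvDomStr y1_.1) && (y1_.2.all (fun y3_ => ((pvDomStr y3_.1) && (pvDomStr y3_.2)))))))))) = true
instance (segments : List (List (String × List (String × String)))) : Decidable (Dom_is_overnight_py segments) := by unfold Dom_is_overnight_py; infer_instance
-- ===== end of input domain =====

-- B flattens the departure/arrival date prefixes into one list in travel order and scans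
-- adjacent pairs once, instead of A's two separate loops (objective: simpler).


-- shared helpers: dict lookup (first match, as for a Python dict ported to an assoc list)
def pvLookup {α : Type} (d : List (String × α)) (k : String) : Option α :=
  (d.find? (fun p => p.1 == k)).map (·.2)

-- seg[k]["at"][:10]; the defaults are never hit under Pre_ (Python raises KeyError there)
def pvDate (seg : List (String × List (String × String))) (k : String) : String :=
  PySem.Str.slice ((pvLookup ((pvLookup seg k).getD []) "at").getD "") none (some 10)

-- ===== PORT A =====
def is_overnight_py (segments : List (List (String × List (String × String)))) : Bool :=
  if segments.any (fun seg => pvDate seg "departure" != pvDate seg "arrival") then true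
  else
    (PySem.List.pyRange 0 ((segments.length : Int) - 1) 1).any (fun i =>
      pvDate (PySem.List.pyGetD segments i []) "arrival"
        != pvDate (PySem.List.pyGetD segments (i + 1) []) "departure")

-- ===== PORT B =====
-- the prev/cur loop over the lazily generated date sequence ('for cur in dates')
def pvScan : String → List String → Bool
  | _, [] => false
  | prev, cur :: rest => if cur != prev then true else pvScan cur rest

def is_overnight_py_alt (segments : List (List (String × List (String × String)))) : Bool :=
  let dates := segments.flatMap (fun seg =>
    (["departure", "arrival"] : List String).map (fun key => pvDate seg key))
  match dates with
  | [] => false                    -- next(dates, None) exhausted: loop body never runs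
  | d :: rest => pvScan d rest

-- ===== PRECONDITION & SPEC =====
-- seg has a "departure"/"arrival" entry each carrying an "at" field
def pvWf (seg : List (String × List (String × String))) : Bool :=
  (["departure", "arrival"] : List String).all (fun k =>
    match seg.find? (fun p => p.1 == k) with
    | some q => (q.2.find? (fun p => p.1 == "at")).isSome
    | none => false)

-- Pre_ excludes exactly the inputs where Python A raises KeyError: some segment lacks a
-- "departure"/"arrival"/"at" entry and no well-formed segment with differing date prefixes
-- precedes the first such malformed segment (otherwise A returns True before touching it).
def Pre_is_overnight_py (segments : List (List (String × List (String × String)))) : Prop :=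
  segments.all pvWf = true ∨
  ∃ j : Fin segments.length,
    (pvWf segments[j] && (pvDate segments[j] "departure" != pvDate segments[j] "arrival")) = true ∧
    ∀ i : Fin segments.length, (i : Nat) < (j : Nat) → pvWf segments[i] = true
instance (segments : List (List (String × List (String × String)))) : Decidable (Pre_is_overnight_py segments) := by unfold Pre_is_overnight_py; infer_instance

def pvWitness_is_overnight_py : (List (List (String × List (String × String)))) :=
  [[("departure", [("at", "2024-01-01T08:00")]), ("arrival", [("at", "2024-01-02T01:00")])]]

def Spec_is_overnight_py (segments : List (List (String × List (String × String)))) (out : Bool) : Prop := out = is_overnight_py_alt segments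
instance (segments : List (List (String × List (String × String)))) (out : Bool) : Decidable (Spec_is_overnight_py segments out) := by unfold Spec_is_overnight_py; infer_instance

-- ===== CLAIM (what is proved, stated in full; the proofs are below) =====
def Claim_equal_is_overnight_py : Prop := ∀ (segments : List (List (String × List (String × String)))), Dom_is_overnight_py segments → Pre_is_overnight_py segments → Spec_is_overnight_py segments (is_overnight_py segments)

-- ===== LEMMAS AND PROOFS =====

-- recursive characterisations used to relate the two shapes
def pvChainNe : List String → Bool
  | x :: y :: t => (x != y) || pvChainNe (y :: t)
  | _ => false

def pvCrossAny {α : Type} (h : α → α → Bool) : List α → Bool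
  | x :: y :: t => h x y || pvCrossAny h (y :: t)
  | _ => false

theorem pv_bne_comm (x y : String) : (x != y) = (y != x) := by
  by_cases h : x = y
  · subst h; rfl
  · have h1 : (x != y) = true := bne_iff_ne.mpr h
    have h2 : (y != x) = true := bne_iff_ne.mpr (Ne.symm h)
    rw [h1, h2]

theorem pv_scan_eq_chain : ∀ (d : String) (l : List String), pvScan d l = pvChainNe (d :: l)
  | _, [] => rfl
  | d, c :: rest => by
      have ih := pv_scan_eq_chain c rest
      show (if (c != d) = true then true else pvScan c rest) = ((d != c) || pvChainNe (c :: rest))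
      rw [ih, pv_bne_comm d c]
      cases c != d <;> simp

theorem pv_cross_nat {α : Type} (h : α → α → Bool) (d : α) : ∀ (xs : List α),
    (List.range (xs.length - 1)).any (fun k => h (xs.getD k d) (xs.getD (k + 1) d))
      = pvCrossAny h xs
  | [] => rfl
  | [_] => rfl
  | x :: y :: t => by
      have ih := pv_cross_nat h d (y :: t)
      simp only [List.length_cons, Nat.add_sub_cancel] at *
      simp only [List.getD_cons_succ] at ih
      rw [List.range_succ_eq_map]
      simp only [List.any_cons, List.any_map, Function.comp_def, List.getD_cons_succ,
        List.getD_cons_zero]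
      rw [ih]; rfl

theorem pv_cross_range {α : Type} (h : α → α → Bool) (d : α) (xs : List α) :
    ((PySem.List.pyRange 0 ((xs.length : Int) - 1) 1).any (fun i =>
      h (PySem.List.pyGetD xs i d) (PySem.List.pyGetD xs (i + 1) d))) = pvCrossAny h xs := by
  cases xs with
  | nil =>
      rw [show ((([] : List α).length : Int) - 1) = -1 by simp,
        PySem.List.pyRange_one_eq_nil (by norm_num)]
      rfl
  | cons a l =>
      have hcast : (((a :: l).length : Int) - 1) = (((a :: l).length - 1 : Nat) : Int) := by
        simp
      rw [hcast, PySem.List.pyRange_zero_natCast, List.any_map]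
      rw [← pv_cross_nat h d (a :: l)]
      apply PySem.List.any_congr_mem
      intro k _
      simp only [Function.comp_def]
      have : ((k : Int) + 1) = ((k + 1 : Nat) : Int) := by push_cast; ring
      rw [this, PySem.List.pyGetD_natCast, PySem.List.pyGetD_natCast]

theorem pv_main {α : Type} (f g : α → String) : ∀ (xs : List α),
    (xs.any (fun s => f s != g s) || pvCrossAny (fun s s' => g s != f s') xs)
      = pvChainNe (xs.flatMap (fun s => [f s, g s]))
  | [] => rfl
  | [s] => by simp [pvCrossAny, pvChainNe]
  | s :: s' :: t => by
      have ih := pv_main f g (s' :: t)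
      simp only [List.any_cons, List.flatMap_cons, List.cons_append, List.nil_append] at *
      show ((f s != g s) || ((s' :: t).any fun a => f a != g a) ||
          ((g s != f s') || pvCrossAny (fun a b => g a != f b) (s' :: t)))
        = ((f s != g s) || pvChainNe (g s :: f s' :: g s' :: (t.flatMap fun a => [f a, g a])))
      have hch : pvChainNe (g s :: f s' :: g s' :: (t.flatMap fun a => [f a, g a]))
          = ((g s != f s') || pvChainNe (f s' :: g s' :: (t.flatMap fun a => [f a, g a]))) := rfl
      rw [hch, ← ih]
      simp only [List.any_cons] at *
      cases f s != g s <;> cases g s != f s' <;>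
        simp [Bool.or_assoc, Bool.or_comm]

theorem pv_eq (segments : List (List (String × List (String × String)))) :
    is_overnight_py segments = is_overnight_py_alt segments := by
  simp only [is_overnight_py, is_overnight_py_alt, List.map_cons, List.map_nil]
  have hmatch : (match segments.flatMap (fun seg => [pvDate seg "departure", pvDate seg "arrival"]) with
      | [] => false
      | d :: rest => pvScan d rest)
      = pvChainNe (segments.flatMap (fun seg => [pvDate seg "departure", pvDate seg "arrival"])) := by
    cases h : segments.flatMap (fun seg => [pvDate seg "departure", pvDate seg "arrival"]) with
    | nil => rfl
    | cons d rest => exact pv_scan_eq_chain d rest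
  rw [hmatch, pv_cross_range (fun s s' => pvDate s "arrival" != pvDate s' "departure") []]
  rw [← pv_main (fun s => pvDate s "departure") (fun s => pvDate s "arrival") segments]
  cases segments.any (fun seg => pvDate seg "departure" != pvDate seg "arrival") <;> simp

-- ===== VERDICT (by name: the statement is the Claim_ definition above) =====
theorem is_overnight_py_spec : Claim_equal_is_overnight_py := by
  intro segments _ _
  exact pv_eq segments
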